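-- pv_equiv track=rewrite | github.com/Yanaigaf/NextPy-Coursework | nextpy4.4.py | gen_days
-- ===== SOURCE A (Python) =====
-- def gen_days(month, year):
--     if year % 400 == 0 or (year % 4 == 0 and year % 100 != 0):
--         # definition of a leap year
--         leap_year = True
--     else:
--         leap_year = False
--     for day in range(1, 29):
--         yield day
--     if month != 2 or leap_year:
--         day += 1
--         yield day
--     if month != 2:
--         day += 1
--         yield day
--     if month in [1, 3, 5, 7, 8, 10, 12]:
--         day += 1
--         yield day
-- ===== SOURCE B (Python) =====
-- def gen_days(month, year):
--     if month in (1, 3, 5, 7, 8, 10, 12):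
--         days = 31
--     elif month == 2:
--         leap = year % 400 == 0 or (year % 4 == 0 and year % 100 != 0)
--         days = 28 + leap
--     else:
--         days = 30
--     yield from range(1, days + 1)
-- ===== Notes on version B (the rewrite author's own statement) =====
-- stated objective: simpler
-- what changed: B computes the month length (31/30/28+leap) up front with one conditional and yields range(1, days+1), instead of A's yield-28-then-append-days-one-by-one control flow.
import Mathlib
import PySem

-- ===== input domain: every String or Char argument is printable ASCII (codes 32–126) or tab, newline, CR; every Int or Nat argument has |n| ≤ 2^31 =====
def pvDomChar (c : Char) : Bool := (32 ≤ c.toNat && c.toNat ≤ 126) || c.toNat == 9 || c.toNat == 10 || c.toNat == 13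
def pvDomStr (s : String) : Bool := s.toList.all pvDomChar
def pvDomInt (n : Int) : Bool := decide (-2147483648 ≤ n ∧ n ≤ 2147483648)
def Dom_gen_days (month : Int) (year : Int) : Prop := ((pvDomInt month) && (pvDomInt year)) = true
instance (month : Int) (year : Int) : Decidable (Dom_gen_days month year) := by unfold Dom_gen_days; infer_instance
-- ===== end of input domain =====

-- B computes the month length (31 / 30 / 28+leap) up front and yields range(1, days+1),
-- instead of A's yield-28-then-conditionally-append-one-day-at-a-time control flow (objective: simpler).

-- ===== PORT A =====
-- literal transliteration: leap flag, yield 1..28, then three conditional extra days tracked via `day`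
def gen_days (month : Int) (year : Int) : List Int :=
  let leap_year : Bool :=
    (PySem.Int.mod year 400 == 0) || ((PySem.Int.mod year 4 == 0) && (PySem.Int.mod year 100 != 0))
  let out : List Int := PySem.List.pyRange 1 29 1
  let day : Int := 28
  let (out, day) :=
    if (month != 2) || leap_year then (out ++ [day + 1], day + 1) else (out, day)
  let (out, day) :=
    if month != 2 then (out ++ [day + 1], day + 1) else (out, day)
  let (out, _day) :=
    if [(1:Int), 3, 5, 7, 8, 10, 12].contains month then (out ++ [day + 1], day + 1) else (out, day)
  out

-- ===== PORT B =====
def gen_days_alt (month : Int) (year : Int) : List Int :=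
  let days : Int :=
    if [(1:Int), 3, 5, 7, 8, 10, 12].contains month then 31
    else if month == 2 then
      28 + (if (PySem.Int.mod year 400 == 0) || ((PySem.Int.mod year 4 == 0) && (PySem.Int.mod year 100 != 0)) then 1 else 0)
    else 30
  PySem.List.pyRange 1 (days + 1) 1

-- ===== PRECONDITION & SPEC =====
def Spec_gen_days (month : Int) (year : Int) (out : List Int) : Prop := out = gen_days_alt month year
instance (month : Int) (year : Int) (out : List Int) : Decidable (Spec_gen_days month year out) := by unfold Spec_gen_days; infer_instance

-- ===== CLAIM (what is proved, stated in full; the proofs are below) =====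
def Claim_equal_gen_days : Prop := ∀ (month : Int) (year : Int), Dom_gen_days month year → Spec_gen_days month year (gen_days month year)

-- ===== LEMMAS AND PROOFS =====

theorem pyRange_snoc (b : Int) (h : 1 ≤ b) :
    PySem.List.pyRange 1 b 1 ++ [b] = PySem.List.pyRange 1 (b + 1) 1 :=
  (PySem.List.pyRange_one_succ_right h).symm

-- ===== VERDICT (by name: the statement is the Claim_ definition above) =====
theorem gen_days_spec : Claim_equal_gen_days := by
  intro month year _
  unfold Spec_gen_days gen_days gen_days_alt
  by_cases hm : month = 1 ∨ month = 3 ∨ month = 5 ∨ month = 7 ∨ month = 8 ∨ month = 10 ∨ month = 12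
  · have h2 : month ≠ 2 := by omega
    by_cases hl : (400:Int) ∣ year ∨ (4:Int) ∣ year ∧ ¬(100:Int) ∣ year <;>
      simp [hm, h2, hl, pyRange_snoc]
  · by_cases h2 : month = 2
    · subst h2
      by_cases hl : (400:Int) ∣ year ∨ (4:Int) ∣ year ∧ ¬(100:Int) ∣ year <;>
        simp [hl, pyRange_snoc]
    · by_cases hl : (400:Int) ∣ year ∨ (4:Int) ∣ year ∧ ¬(100:Int) ∣ year <;>
        simp [hm, h2, hl, pyRange_snoc]
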